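-- pv_equiv track=rewrite | github.com/YvonMartin/logic-minimiser-v02 | solvebool.py | acqui_terme
-- ===== SOURCE A (Python) =====
-- def acqui_terme(chaine01, lg):
--     """
--     Transforms into tuple (term, mask) an entry of type for example '01-10-' -> (20, 9)
--     """
--     erreur = False
--     nbr = len(chaine01)
--     terme, msq = 0, 0
--     msq = 0
--     if lg != nbr:
--         erreur = True
--         return (terme, msq), erreur
--     pt = 1 << nbr
--     for i in chaine01:
--         pt >>= 1
--         if i == "1":
--             terme += pt
--         elif i == "-":
--             msq += pt
--         elif i != "0":
--             erreur = True
--             terme, msq = 0, 0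
--             break
--     return (terme, msq), erreur
-- ===== SOURCE B (Python) =====
-- def acqui_terme(chaine01, lg):
--     """
--     Transforms into tuple (term, mask) an entry of type for example '01-10-' -> (20, 9)
--     """
--     if lg != len(chaine01):
--         return (0, 0), True
--     if any(c not in "01-" for c in chaine01):
--         return (0, 0), True
--     terme = int(chaine01.replace('-', '0') or '0', 2)
--     msq = int(''.join('1' if c == '-' else '0' for c in chaine01) or '0', 2)
--     return (terme, msq), False
-- ===== Notes on version B (the rewrite author's own statement) =====
-- stated objective: idiomatic
-- what changed: Replaces A's manual positional-weight accumulator loop (pt = 1<<n shifted down each step, with an in-loop error break) by upfront character validation followed by Python's built-in base-2 int parsing of a '-'-masked copy for the term and of the '-'-indicator string for the mask.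
import Mathlib
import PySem

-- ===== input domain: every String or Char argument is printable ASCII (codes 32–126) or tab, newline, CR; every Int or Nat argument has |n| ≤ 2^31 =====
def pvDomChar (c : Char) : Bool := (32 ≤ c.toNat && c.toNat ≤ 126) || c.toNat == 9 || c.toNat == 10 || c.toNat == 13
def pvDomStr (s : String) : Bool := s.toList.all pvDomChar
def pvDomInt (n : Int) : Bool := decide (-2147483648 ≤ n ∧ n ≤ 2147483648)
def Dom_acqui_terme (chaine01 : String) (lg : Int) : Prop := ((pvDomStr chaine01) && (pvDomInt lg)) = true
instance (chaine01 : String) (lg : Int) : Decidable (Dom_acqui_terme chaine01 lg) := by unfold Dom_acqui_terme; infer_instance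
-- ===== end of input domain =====

-- B replaces A's shifted positional-weight accumulator loop (with its in-loop error break) by upfront validation plus two base-2 parses (idiomatic).

-- ===== PORT A =====
-- A's for-loop with its break: state (pt, terme, msq); `pt >>= 1` is pt / 2 (exact here: pt stays a positive power of two)
def acquiLoopA : List Char → Int → Int → Int → (Int × Int) × Bool
  | [], _, terme, msq => ((terme, msq), false)
  | c :: cs, pt, terme, msq =>
    let pt := pt / 2
    if c = '1' then acquiLoopA cs pt (terme + pt) msq
    else if c = '-' then acquiLoopA cs pt terme (msq + pt)
    else if c ≠ '0' then ((0, 0), true)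
    else acquiLoopA cs pt terme msq

def acqui_terme (chaine01 : String) (lg : Int) : (Int × Int) × Bool :=
  -- nbr = len(chaine01); if lg != nbr: return (0,0), True
  if lg ≠ PySem.Str.len chaine01 then ((0, 0), true)
  else
    -- pt = 1 << nbr (nbr = len ≥ 0, so exactly 2 ^ len), then the loop
    acquiLoopA chaine01.toList (2 ^ chaine01.toList.length) 0 0

-- ===== PORT B =====
-- int(s, 2) on a string of '0'/'1' chars (0 for the empty string, matching Source B's `or '0'` guard)
def parseBin2 (l : List Char) : Int :=
  l.foldl (fun acc c => 2 * acc + (if c = '1' then 1 else 0)) 0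

def acqui_terme_alt (chaine01 : String) (lg : Int) : (Int × Int) × Bool :=
  if lg ≠ PySem.Str.len chaine01 then ((0, 0), true)
  else if chaine01.toList.any (fun c => !(c == '0' || c == '1' || c == '-')) then ((0, 0), true)
  else
    -- terme = int(chaine01.replace('-','0') or '0', 2); msq = int(''.join('1' if c=='-' else '0' ...) or '0', 2)
    ((parseBin2 (chaine01.toList.map (fun c => if c = '-' then '0' else c)),
      parseBin2 (chaine01.toList.map (fun c => if c = '-' then '1' else '0'))), false)

-- ===== PRECONDITION & SPEC =====
def Spec_acqui_terme (chaine01 : String) (lg : Int) (out : (Int × Int) × Bool) : Prop := out = acqui_terme_alt chaine01 lg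
instance (chaine01 : String) (lg : Int) (out : (Int × Int) × Bool) : Decidable (Spec_acqui_terme chaine01 lg out) := by unfold Spec_acqui_terme; infer_instance

-- ===== CLAIM (what is proved, stated in full; the proofs are below) =====
def Claim_equal_acqui_terme : Prop := ∀ (chaine01 : String) (lg : Int), Dom_acqui_terme chaine01 lg → Spec_acqui_terme chaine01 lg (acqui_terme chaine01 lg)

-- ===== LEMMAS AND PROOFS =====

lemma foldl_bin_acc (l : List Char) : ∀ a : Int,
    l.foldl (fun acc c => 2 * acc + (if c = '1' then 1 else 0)) a
      = a * 2 ^ l.length + l.foldl (fun acc c => 2 * acc + (if c = '1' then 1 else 0)) 0 := by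
  induction l with
  | nil => intro a; simp
  | cons c cs ih =>
    intro a
    simp only [List.foldl_cons, List.length_cons]
    rw [ih, ih (2 * 0 + (if c = '1' then 1 else 0))]
    ring

lemma parseBin2_cons (c : Char) (l : List Char) :
    parseBin2 (c :: l) = (if c = '1' then (1 : Int) else 0) * 2 ^ l.length + parseBin2 l := by
  simp only [parseBin2, List.foldl_cons]
  rw [foldl_bin_acc]
  ring

lemma pow_succ_div_two (n : ℕ) : ((2 : Int) ^ (n + 1)) / 2 = 2 ^ n := by
  rw [pow_succ]
  exact Int.mul_ediv_cancel _ (by norm_num)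

-- A's loop breaks to ((0,0), true) as soon as an invalid char exists
lemma acquiLoopA_invalid : ∀ (cs : List Char) (pt t m : Int),
    (∃ c ∈ cs, ¬ (c = '0' ∨ c = '1' ∨ c = '-')) →
    acquiLoopA cs pt t m = ((0, 0), true) := by
  intro cs
  induction cs with
  | nil => intro _ _ _ h; simp at h
  | cons c cs ih =>
    intro pt t m h
    rcases h with ⟨d, hd, hbad⟩
    simp only [List.mem_cons] at hd
    by_cases h1 : c = '1'
    · have : ∃ c ∈ cs, ¬ (c = '0' ∨ c = '1' ∨ c = '-') := by
        rcases hd with rfl | hd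
        · exact absurd (Or.inr (Or.inl h1)) hbad
        · exact ⟨d, hd, hbad⟩
      simp [acquiLoopA, h1, ih _ _ _ this]
    · by_cases hm : c = '-'
      · have : ∃ c ∈ cs, ¬ (c = '0' ∨ c = '1' ∨ c = '-') := by
          rcases hd with rfl | hd
          · exact absurd (Or.inr (Or.inr hm)) hbad
          · exact ⟨d, hd, hbad⟩
        simp [acquiLoopA, hm, ih _ _ _ this]
      · by_cases h0 : c = '0'
        · have : ∃ c ∈ cs, ¬ (c = '0' ∨ c = '1' ∨ c = '-') := by
            rcases hd with rfl | hd
            · exact absurd (Or.inl h0) hbad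
            · exact ⟨d, hd, hbad⟩
          simp [acquiLoopA, h0, ih _ _ _ this]
        · simp [acquiLoopA, h1, hm, h0]

-- on all-valid input, A's loop computes exactly B's two base-2 parses
lemma acquiLoopA_valid : ∀ (cs : List Char) (t m : Int),
    (∀ c ∈ cs, c = '0' ∨ c = '1' ∨ c = '-') →
    acquiLoopA cs (2 ^ cs.length) t m
      = ((t + parseBin2 (cs.map (fun c => if c = '-' then '0' else c)),
          m + parseBin2 (cs.map (fun c => if c = '-' then '1' else '0'))), false) := by
  intro cs
  induction cs with
  | nil => intro t m _; simp [acquiLoopA, parseBin2]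
  | cons c cs ih =>
    intro t m hval
    have htail : ∀ c ∈ cs, c = '0' ∨ c = '1' ∨ c = '-' :=
      fun d hd => hval d (List.mem_cons_of_mem _ hd)
    have hpt := pow_succ_div_two cs.length
    rcases hval c (List.mem_cons_self ..) with h0 | h1 | hm
    · subst h0
      have step : acquiLoopA ('0' :: cs) (2 ^ ('0' :: cs).length) t m
          = acquiLoopA cs (2 ^ cs.length) t m := by
        simp [acquiLoopA, hpt]
      have e1 : parseBin2 (('0' :: cs).map (fun c => if c = '-' then '0' else c))
          = parseBin2 (cs.map (fun c => if c = '-' then '0' else c)) := by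
        simp [parseBin2_cons]
      have e2 : parseBin2 (('0' :: cs).map (fun c => if c = '-' then '1' else '0'))
          = parseBin2 (cs.map (fun c => if c = '-' then '1' else '0')) := by
        simp [parseBin2_cons]
      rw [step, ih _ _ htail, e1, e2]
    · subst h1
      have step : acquiLoopA ('1' :: cs) (2 ^ ('1' :: cs).length) t m
          = acquiLoopA cs (2 ^ cs.length) (t + 2 ^ cs.length) m := by
        simp [acquiLoopA, hpt]
      have e1 : parseBin2 (('1' :: cs).map (fun c => if c = '-' then '0' else c))
          = 2 ^ cs.length + parseBin2 (cs.map (fun c => if c = '-' then '0' else c)) := by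
        simp [parseBin2_cons]
      have e2 : parseBin2 (('1' :: cs).map (fun c => if c = '-' then '1' else '0'))
          = parseBin2 (cs.map (fun c => if c = '-' then '1' else '0')) := by
        simp [parseBin2_cons]
      rw [step, ih _ _ htail, e1, e2]
      simp only [Prod.mk.injEq]
      exact ⟨⟨by ring, trivial⟩, trivial⟩
    · subst hm
      have step : acquiLoopA ('-' :: cs) (2 ^ ('-' :: cs).length) t m
          = acquiLoopA cs (2 ^ cs.length) t (m + 2 ^ cs.length) := by
        simp [acquiLoopA, hpt]
      have e1 : parseBin2 (('-' :: cs).map (fun c => if c = '-' then '0' else c))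
          = parseBin2 (cs.map (fun c => if c = '-' then '0' else c)) := by
        simp [parseBin2_cons]
      have e2 : parseBin2 (('-' :: cs).map (fun c => if c = '-' then '1' else '0'))
          = 2 ^ cs.length + parseBin2 (cs.map (fun c => if c = '-' then '1' else '0')) := by
        simp [parseBin2_cons]
      rw [step, ih _ _ htail, e1, e2]
      simp only [Prod.mk.injEq]
      exact ⟨⟨trivial, by ring⟩, trivial⟩

lemma any_invalid_iff (cs : List Char) :
    (cs.any (fun c => !(c == '0' || c == '1' || c == '-')) = true)
      ↔ ∃ c ∈ cs, ¬ (c = '0' ∨ c = '1' ∨ c = '-') := by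
  simp [List.any_eq_true]
  tauto

-- ===== VERDICT (by name: the statement is the Claim_ definition above) =====
theorem acqui_terme_spec : Claim_equal_acqui_terme := by
  intro chaine01 lg _
  unfold Spec_acqui_terme acqui_terme acqui_terme_alt
  by_cases hlg : lg ≠ PySem.Str.len chaine01
  · rw [if_pos hlg, if_pos hlg]
  · rw [if_neg hlg, if_neg hlg]
    by_cases hany : chaine01.toList.any (fun c => !(c == '0' || c == '1' || c == '-')) = true
    · rw [if_pos hany, acquiLoopA_invalid _ _ _ _ ((any_invalid_iff _).mp hany)]
    · rw [if_neg hany]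
      have hval : ∀ c ∈ chaine01.toList, c = '0' ∨ c = '1' ∨ c = '-' := by
        intro c hc
        by_contra h
        exact hany ((any_invalid_iff _).mpr ⟨c, hc, h⟩)
      rw [acquiLoopA_valid _ _ _ hval]
      norm_num
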